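/- GENERATED by c/gen_decode.py: decode facts of the image, one per distinct instruction byte string. -/
import UserX.DecodeImage

#decode_all Vorbis.Dec
  "0f571de8630100"  -- xorps xmm3,XMMWORD PTR [rip+0x163e8]
  "0f84a9000000"  -- je 114651
  "0f8592000000"  -- jne 10eb19
  "0f8e060f0000"  -- jle 1151bf
  "0fb633"  -- movzx esi,BYTE PTR [rbx]
  "25ff00ff00"  -- and eax,0xff00ff
  "3d02fcffff"  -- cmp eax,0xfffffc02
  "410fb71c5e"  -- movzx ebx,WORD PTR [r14+rbx*2]
  "4183c101"  -- add r9d,0x1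
  "4189cc"  -- mov r12d,ecx
  "418d6c0500"  -- lea ebp,[r13+rax*1+0x0]
  "41f7761c"  -- div DWORD PTR [r14+0x1c]
  "4421f0"  -- and eax,r14d
  "44887500"  -- mov BYTE PTR [rbp+0x0],r14b
  "4489ada0000000"  -- mov DWORD PTR [rbp+0xa0],r13d
  "448b6c241c"  -- mov r13d,DWORD PTR [rsp+0x1c]
  "448d6d07"  -- lea r13d,[rbp+0x7]
  "45893c24"  -- mov DWORD PTR [r12],r15d
  "458d67ff"  -- lea r12d,[r15-0x1]
  "4829c4"  -- sub rsp,rax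
  "4863fd"  -- movsxd rdi,ebp
  "4883eb01"  -- sub rbx,0x1
  "4889742410"  -- mov QWORD PTR [rsp+0x10],rsi
  "488b442420"  -- mov rax,QWORD PTR [rsp+0x20]
  "488b9550ffffff"  -- mov rdx,QWORD PTR [rbp-0xb0]
  "488d5437ff"  -- lea rdx,[rdi+rsi*1-0x1]
  "488d7d08"  -- lea rdi,[rbp+0x8]
  "488dbb40080000"  -- lea rdi,[rbx+0x840]
  "488dbd90000000"  -- lea rdi,[rbp+0x90]
  "48c7442410409a1100"  -- mov QWORD PTR [rsp+0x10],0x119a40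
  "49039d38080000"  -- add rbx,QWORD PTR [r13+0x838]
  "49895d00"  -- mov QWORD PTR [r13+0x0],rbx
  "498d7c1f01"  -- lea rdi,[r15+rbx*1+0x1]
  "498dbc4744010000"  -- lea rdi,[r15+rax*2+0x144]
  "4a8b7ce508"  -- mov rdi,QWORD PTR [rbp+r12*8+0x8]
  "4c036508"  -- add r12,QWORD PTR [rbp+0x8]
  "4c896d28"  -- mov QWORD PTR [rbp+0x28],r13
  "4c8b6c2458"  -- mov r13,QWORD PTR [rsp+0x58]
  "4c8d641b01"  -- lea r12,[rbx+rbx*1+0x1]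
  "4d892f"  -- mov QWORD PTR [r15],r13
  "4e8d3c28"  -- lea r15,[rax+r13*1]
  "660fefd2"  -- pxor xmm2,xmm2
  "6644896302"  -- mov WORD PTR [rbx+0x2],r12w
  "7385"  -- jae 104a15
  "747a"  -- je 1141ad
  "75d2"  -- jne 10f911
  "7d26"  -- jge 10eb20
  "7f26"  -- jg 113fa7
  "81ff02fcffff"  -- cmp edi,0xfffffc02
  "83f802"  -- cmp eax,0x2
  "89542408"  -- mov DWORD PTR [rsp+0x8],edx
  "89c3"  -- mov ebx,eax
  "8b45a0"  -- mov eax,DWORD PTR [rbp-0x60]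
  "8b83ec060000"  -- mov eax,DWORD PTR [rbx+0x6ec]
  "8d7301"  -- lea esi,[rbx+0x1]
  "bf01000000"  -- mov edi,0x1
  "c744243800000000"  -- mov DWORD PTR [rsp+0x38],0x0
  "c7849c8002000000000000"  -- mov DWORD PTR [rsp+rbx*4+0x280],0x0
  "e806faffff"  -- call 101300
  "e8109ffeff"  -- call 1003c0
  "e81a54ffff"  -- call 100640
  "e823fbffff"  -- call 107500
  "e82cf1feff"  -- call 100480
  "e836d5feff"  -- call 101520
  "e8426efeff"  -- call 100640
  "e84cbfffff"  -- call 105740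
  "e856ebfeff"  -- call 100720
  "e8648fffff"  -- call 1016e0
  "e86ff3feff"  -- call 100300
  "e87aa5feff"  -- call 100640
  "e886b4ffff"  -- call 100640
  "e8907fffff"  -- call 104060
  "e89a74ffff"  -- call 108640
  "e8a5abffff"  -- call 100640
  "e8afacfeff"  -- call 100720
  "e8b8b9ffff"  -- call 100800
  "e8c36affff"  -- call 100800
  "e8cc67ffff"  -- call 100720
  "e8d76ffeff"  -- call 100720
  "e8e13effff"  -- call 100720
  "e8eaf8ffff"  -- call 100059
  "e8f233ffff"  -- call 100640
  "e8fdc0ffff"  -- call 100640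
  "e937070000"  -- jmp 10f6a7
  "e982000000"  -- jmp 1156e6
  "e9d5d7ffff"  -- jmp 113b22
  "eb43"  -- jmp 119bb9
  "ebc8"  -- jmp 1083b3
  "f20f2a4c240c"  -- cvtsi2sd xmm1,DWORD PTR [rsp+0xc]
  "f20f59f8"  -- mulsd xmm7,xmm0
  "f30f10442418"  -- movss xmm0,DWORD PTR [rsp+0x18]
  "f30f106be8"  -- movss xmm5,DWORD PTR [rbx-0x18]
  "f30f1145ec"  -- movss DWORD PTR [rbp-0x14],xmm0
  "f30f116bec"  -- movss DWORD PTR [rbx-0x14],xmm5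
  "f30f584bf4"  -- addss xmm1,DWORD PTR [rbx-0xc]
  "f30f597d20"  -- mulss xmm7,DWORD PTR [rbp+0x20]
  "f30f5ceb"  -- subss xmm5,xmm3
  "f3410f114f04"  -- movss DWORD PTR [r15+0x4],xmm1
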